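-- pv_equiv track=rewrite | github.com/shkurtajadela/School21 | Python Bootcamp/Python_Bootcamp.Day00-1-develop/src/mfinder.py | is_m_pattern
-- ===== SOURCE A (Python) =====
-- def is_m_pattern(image):
--     m_pattern = [
--         "*   *",
--         "** **",
--         "* * *"
--     ]
--
--     if len(image) != 3 or any(len(row) != 5 for row in image):
--         return "Error"
--
--     for pattern_row, image_row in zip(m_pattern, image):
--         for p_char, i_char in zip(pattern_row, image_row):
--             if (p_char == "*" and i_char != "*") or (p_char != "*" and i_char == "*"):
--                 return "False"
--
--     return "True"
-- ===== SOURCE B (Python) =====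
-- M_CODE = 22385  # 15-bit row-major fingerprint of the M pattern "*   *","** **","* * *"
--
-- def is_m_pattern(image):
--     if len(image) != 3 or any(len(row) != 5 for row in image):
--         return "Error"
--     code = 0
--     bit = 1
--     for row in image:
--         for ch in row:
--             if ch == "*":
--                 code += bit
--             bit += bit
--     return "True" if code == M_CODE else "False"
-- ===== Notes on version B (the rewrite author's own statement) =====
-- stated objective: alternative
-- what changed: A's short-circuiting cell-by-cell comparison against the hardcoded pattern grid is replaced by a single accumulation pass that encodes the image's star cells as a 15-bit integer fingerprint (row-major place values) and compares that one integer with the precomputed constant 22385; no pattern grid or per-cell template comparison remains.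
import Mathlib
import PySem

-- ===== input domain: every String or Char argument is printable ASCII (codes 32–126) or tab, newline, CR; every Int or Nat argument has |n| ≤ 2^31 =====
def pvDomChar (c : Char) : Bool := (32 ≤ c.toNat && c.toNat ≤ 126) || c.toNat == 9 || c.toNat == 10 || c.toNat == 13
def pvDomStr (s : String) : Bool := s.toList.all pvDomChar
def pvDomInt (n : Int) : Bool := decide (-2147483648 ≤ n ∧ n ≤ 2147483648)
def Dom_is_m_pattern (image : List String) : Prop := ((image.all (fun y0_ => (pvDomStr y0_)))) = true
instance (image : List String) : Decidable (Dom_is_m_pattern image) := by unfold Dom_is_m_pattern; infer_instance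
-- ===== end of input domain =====

-- B replaces A's cell-by-cell comparison against the pattern grid with a single accumulation
-- pass encoding the star cells as a 15-bit integer fingerprint compared with one constant
-- (objective: alternative).

-- ===== PORT A =====
-- inner loop: 'for p_char, i_char in zip(pattern_row, image_row): if … return "False"'
def pvChkRow : List Char → List Char → Bool
  | p :: ps, i :: is_ =>
    if (p == '*' && i != '*') || (p != '*' && i == '*') then false else pvChkRow ps is_
  | _, _ => true

-- outer loop: 'for pattern_row, image_row in zip(m_pattern, image): …'
def pvChkRows : List (String × String) → Bool
  | (p, i) :: rest => if pvChkRow p.toList i.toList then pvChkRows rest else false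
  | [] => true

def is_m_pattern (image : List String) : String :=
  let m_pattern : List String := ["*   *", "** **", "* * *"]
  if image.length ≠ 3 || image.any (fun row => PySem.Str.len row ≠ 5) then "Error"
  else if pvChkRows (m_pattern.zip image) then "True" else "False"

-- ===== PORT B =====
def pvMCode : Int := 22385

-- inner loop of B: 'for ch in row: if ch == "*": code += bit; bit += bit'
def pvAccRow (st : Int × Int) (l : List Char) : Int × Int :=
  l.foldl (fun st ch => (if ch == '*' then st.1 + st.2 else st.1, st.2 + st.2)) st

def is_m_pattern_alt (image : List String) : String :=
  if image.length ≠ 3 || image.any (fun row => PySem.Str.len row ≠ 5) then "Error"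
  else
    let st := image.foldl (fun st row => pvAccRow st row.toList) ((0 : Int), (1 : Int))
    if st.1 == pvMCode then "True" else "False"

-- ===== PRECONDITION & SPEC =====
def Spec_is_m_pattern (image : List String) (out : String) : Prop := out = is_m_pattern_alt image
instance (image : List String) (out : String) : Decidable (Spec_is_m_pattern image out) := by unfold Spec_is_m_pattern; infer_instance

-- ===== CLAIM (what is proved, stated in full; the proofs are below) =====
def Claim_equal_is_m_pattern : Prop := ∀ (image : List String), Dom_is_m_pattern image → Spec_is_m_pattern image (is_m_pattern image)

-- ===== LEMMAS AND PROOFS =====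

-- row value: the 5-bit number a row of 5 characters contributes (low bit = leftmost cell)
def pvRv (c0 c1 c2 c3 c4 : Char) : Int :=
  (if c0 == '*' then 1 else 0) + (if c1 == '*' then 2 else 0) + (if c2 == '*' then 4 else 0)
    + (if c3 == '*' then 8 else 0) + (if c4 == '*' then 16 else 0)

lemma pvRv_bounds (c0 c1 c2 c3 c4 : Char) :
    0 ≤ pvRv c0 c1 c2 c3 c4 ∧ pvRv c0 c1 c2 c3 c4 < 32 := by
  unfold pvRv; split_ifs <;> omega

lemma accRow_eq (code bit : Int) (c0 c1 c2 c3 c4 : Char) :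
    pvAccRow (code, bit) [c0, c1, c2, c3, c4]
      = (code + bit * pvRv c0 c1 c2 c3 c4, 32 * bit) := by
  simp only [pvAccRow, List.foldl_cons, List.foldl_nil, pvRv]
  split_ifs <;> exact Prod.ext (by ring) (by ring)

-- each row check of A is the corresponding 5-bit value test
lemma chk_row0 (c0 c1 c2 c3 c4 : Char) :
    pvChkRow "*   *".toList [c0, c1, c2, c3, c4] = (pvRv c0 c1 c2 c3 c4 == 17) := by
  simp only [pvChkRow, pvRv, bne,
    show ("*   *".toList) = ['*', ' ', ' ', ' ', '*'] from rfl,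
    show (('*' : Char) == '*') = true from rfl, show ((' ' : Char) == '*') = false from rfl,
    Bool.not_true, Bool.not_false, Bool.true_and, Bool.false_and, Bool.false_or, Bool.or_false]
  generalize (c0 == '*') = a0
  generalize (c1 == '*') = a1
  generalize (c2 == '*') = a2
  generalize (c3 == '*') = a3
  generalize (c4 == '*') = a4
  revert a0 a1 a2 a3 a4; decide

lemma chk_row1 (c0 c1 c2 c3 c4 : Char) :
    pvChkRow "** **".toList [c0, c1, c2, c3, c4] = (pvRv c0 c1 c2 c3 c4 == 27) := by
  simp only [pvChkRow, pvRv, bne,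
    show ("** **".toList) = ['*', '*', ' ', '*', '*'] from rfl,
    show (('*' : Char) == '*') = true from rfl, show ((' ' : Char) == '*') = false from rfl,
    Bool.not_true, Bool.not_false, Bool.true_and, Bool.false_and, Bool.false_or, Bool.or_false]
  generalize (c0 == '*') = a0
  generalize (c1 == '*') = a1
  generalize (c2 == '*') = a2
  generalize (c3 == '*') = a3
  generalize (c4 == '*') = a4
  revert a0 a1 a2 a3 a4; decide

lemma chk_row2 (c0 c1 c2 c3 c4 : Char) :
    pvChkRow "* * *".toList [c0, c1, c2, c3, c4] = (pvRv c0 c1 c2 c3 c4 == 21) := by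
  simp only [pvChkRow, pvRv, bne,
    show ("* * *".toList) = ['*', ' ', '*', ' ', '*'] from rfl,
    show (('*' : Char) == '*') = true from rfl, show ((' ' : Char) == '*') = false from rfl,
    Bool.not_true, Bool.not_false, Bool.true_and, Bool.false_and, Bool.false_or, Bool.or_false]
  generalize (c0 == '*') = a0
  generalize (c1 == '*') = a1
  generalize (c2 == '*') = a2
  generalize (c3 == '*') = a3
  generalize (c4 == '*') = a4
  revert a0 a1 a2 a3 a4; decide

-- the key pointwise lemma: A's zip-check equals B's fingerprint test for any 3×5 image
-- (22385 = 17 + 32·27 + 1024·21: base-32 digits are unique given 0 ≤ v < 32)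
lemma key (x0 x1 x2 x3 x4 y0 y1 y2 y3 y4 z0 z1 z2 z3 z4 : Char) :
    pvChkRows ((["*   *", "** **", "* * *"] : List String).zip
      [String.ofList [x0, x1, x2, x3, x4], String.ofList [y0, y1, y2, y3, y4],
       String.ofList [z0, z1, z2, z3, z4]])
    = ((([String.ofList [x0, x1, x2, x3, x4], String.ofList [y0, y1, y2, y3, y4],
        String.ofList [z0, z1, z2, z3, z4]].foldl
          (fun st row => pvAccRow st row.toList) ((0 : Int), (1 : Int))).1) == pvMCode) := by
  simp only [pvChkRows, pvMCode, String.toList_ofList, List.zip, List.zipWith,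
    List.foldl_cons, List.foldl_nil, accRow_eq, chk_row0, chk_row1, chk_row2]
  obtain ⟨h0l, h0r⟩ := pvRv_bounds x0 x1 x2 x3 x4
  obtain ⟨h1l, h1r⟩ := pvRv_bounds y0 y1 y2 y3 y4
  obtain ⟨h2l, h2r⟩ := pvRv_bounds z0 z1 z2 z3 z4
  generalize pvRv x0 x1 x2 x3 x4 = v0 at *
  generalize pvRv y0 y1 y2 y3 y4 = v1 at *
  generalize pvRv z0 z1 z2 z3 z4 = v2 at *
  split_ifs <;> (try simp_all only [beq_iff_eq]) <;>
    first
      | omega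
      | (symm; rw [beq_iff_eq]; omega)
      | (symm; rw [beq_eq_false_iff_ne]; omega)

-- ===== VERDICT (by name: the statement is the Claim_ definition above) =====
theorem is_m_pattern_spec : Claim_equal_is_m_pattern := by
  intro image _
  unfold Spec_is_m_pattern
  by_cases hg : (image.length ≠ 3 || image.any (fun row => PySem.Str.len row ≠ 5)) = true
  · rw [is_m_pattern, is_m_pattern_alt, if_pos hg, if_pos hg]
  · have hl : image.length = 3 := by
      by_contra h
      simp [h] at hg
    match image, hl with
    | [a, b, c], _ =>
      have hrow : ∀ s : String, s ∈ [a, b, c] → s.toList.length = 5 := by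
        intro s hs
        by_contra h
        apply hg
        simp only [Bool.or_eq_true, List.any_eq_true]
        refine Or.inr ⟨s, hs, ?_⟩
        simp only [PySem.Str.len, decide_eq_true_eq]
        omega
      have ha := hrow a (by simp)
      have hb := hrow b (by simp)
      have hc := hrow c (by simp)
      match ha' : a.toList, ha, hb' : b.toList, hb, hc' : c.toList, hc with
      | [x0, x1, x2, x3, x4], _, [y0, y1, y2, y3, y4], _, [z0, z1, z2, z3, z4], _ =>
        have ea : a = String.ofList [x0, x1, x2, x3, x4] := by rw [← ha', String.ofList_toList]
        have eb : b = String.ofList [y0, y1, y2, y3, y4] := by rw [← hb', String.ofList_toList]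
        have ec : c = String.ofList [z0, z1, z2, z3, z4] := by rw [← hc', String.ofList_toList]
        rw [ea, eb, ec] at hg ⊢
        simp only [Bool.not_eq_true] at hg
        rw [is_m_pattern, is_m_pattern_alt]
        simp only [hg, Bool.false_eq_true, if_false, key]
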